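-- pv_equiv track=rewrite | github.com/kyoungbinkim/algorithmStudy | baekJoon/1843.py | constraintB
-- ===== SOURCE A (Python) =====
-- from math import sqrt, floor
--
-- def constraintB(num):
--     ans = 0
--     divisorList = []
--     for i in range(1, floor(sqrt(num))+1):
--         if num % i == 0:
--             if i != num//i:
--                 divisorList.append(i)
--                 divisorList.append(num // i)
--             else:
--                 divisorList.append(i)
--     for i in range(len(divisorList)):
--         for j in range(i, len(divisorList)):
--             if num % (divisorList[i] + divisorList[j]) == 0:
--                 ans += 1
--     return ans
-- ===== SOURCE B (Python) =====
-- from math import sqrt, floor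
--
-- def constraintB(num):
--     divs = []
--     for d in range(1, floor(sqrt(num)) + 1):
--         if num % d == 0:
--             divs.append(d)
--             if d != num // d:
--                 divs.append(num // d)
--     # count ordered pairs (a, b) whose sum divides num, plus the diagonal,
--     # then halve: unordered-pair count = (ordered + diagonal) // 2
--     total = 0
--     for a in divs:
--         for b in divs:
--             if num % (a + b) == 0:
--                 total += 1
--     diag = 0
--     for a in divs:
--         if num % (a + a) == 0:
--             diag += 1
--     return (total + diag) // 2
-- ===== Notes on version B (the rewrite author's own statement) =====
-- stated objective: alternative
-- what changed: A enumerates index pairs i<=j of the divisor list in a triangular nested loop; B instead counts ALL ordered pairs (a,b) with (a+b)|num over the full Cartesian product, separately counts the diagonal pairs (a,a), and recovers the unordered-pair count by the double-counting identity (total+diag)//2.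
import Mathlib
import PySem

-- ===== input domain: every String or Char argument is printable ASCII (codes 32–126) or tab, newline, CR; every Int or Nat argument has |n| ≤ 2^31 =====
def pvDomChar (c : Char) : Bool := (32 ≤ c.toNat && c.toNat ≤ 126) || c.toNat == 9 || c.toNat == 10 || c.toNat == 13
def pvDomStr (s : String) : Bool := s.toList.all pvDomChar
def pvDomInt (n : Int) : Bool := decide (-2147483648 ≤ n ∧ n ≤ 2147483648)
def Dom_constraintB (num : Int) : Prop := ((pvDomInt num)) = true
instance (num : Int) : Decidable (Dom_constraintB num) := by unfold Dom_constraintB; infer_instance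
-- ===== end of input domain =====

-- B replaces A's triangular index-pair loop by full-Cartesian-product double counting plus a
-- diagonal pass, combined with (total+diag)//2; same asymptotic cost ("alternative", not faster).

-- ===== PORT A =====
-- floor(sqrt(num)) is ported as Int.sqrt: exact on the admitted domain (0 ≤ num ≤ 2^31,
-- where CPython's float sqrt+floor equals isqrt); negative num (math domain error) is outside Pre_.
def pvDivisorsA (num : Int) : List Int :=
  (PySem.List.pyRange 1 (Int.sqrt num + 1) 1).foldl (fun acc i =>
    if PySem.Int.mod num i == 0 then
      if i != PySem.Int.floordiv num i then
        acc ++ [i] ++ [PySem.Int.floordiv num i]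
      else
        acc ++ [i]
    else acc) []

def constraintB (num : Int) : Int :=
  let divisorList := pvDivisorsA num
  (PySem.List.pyRange 0 (PySem.List.len divisorList) 1).foldl (fun ans i =>
    (PySem.List.pyRange i (PySem.List.len divisorList) 1).foldl (fun ans j =>
      if PySem.Int.mod num (PySem.List.pyGetD divisorList i 0 + PySem.List.pyGetD divisorList j 0) == 0
      then ans + 1 else ans) ans) 0

-- ===== PORT B =====
def pvDivisorsB (num : Int) : List Int :=
  (PySem.List.pyRange 1 (Int.sqrt num + 1) 1).foldl (fun acc d =>
    if PySem.Int.mod num d == 0 then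
      if d != PySem.Int.floordiv num d then
        (acc ++ [d]) ++ [PySem.Int.floordiv num d]
      else
        acc ++ [d]
    else acc) []

def constraintB_alt (num : Int) : Int :=
  let divs := pvDivisorsB num
  let total := divs.foldl (fun acc a =>
    divs.foldl (fun acc b =>
      if PySem.Int.mod num (a + b) == 0 then acc + 1 else acc) acc) 0
  let diag := divs.foldl (fun acc a =>
    if PySem.Int.mod num (a + a) == 0 then acc + 1 else acc) 0
  PySem.Int.floordiv (total + diag) 2

-- ===== PRECONDITION & SPEC =====
-- Pre_ excludes negative num, where the Python A (and B) raise ValueError in math.sqrt.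
def Pre_constraintB (num : Int) : Prop := 0 ≤ num
instance (num : Int) : Decidable (Pre_constraintB num) := by unfold Pre_constraintB; infer_instance
def pvWitness_constraintB : Int := 12

def Spec_constraintB (num : Int) (out : Int) : Prop := out = constraintB_alt num
instance (num : Int) (out : Int) : Decidable (Spec_constraintB num out) := by unfold Spec_constraintB; infer_instance

-- ===== CLAIM (what is proved, stated in full; the proofs are below) =====
def Claim_equal_constraintB : Prop := ∀ (num : Int), Dom_constraintB num → Pre_constraintB num → Spec_constraintB num (constraintB num)

-- ===== LEMMAS AND PROOFS =====

-- the triangular count A computes, as structural recursion on the divisor list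
def pvTriCount (P : Int → Bool) : List Int → Int
  | [] => 0
  | x :: t => ((x :: t).countP (fun b => P (x + b)) : Int) + pvTriCount P t

theorem pvDivisors_eq (num : Int) : pvDivisorsA num = pvDivisorsB num := by
  unfold pvDivisorsA pvDivisorsB
  apply PySem.List.foldl_congr_mem
  intro acc i _
  split_ifs <;> simp

theorem pvA_loop (num : Int) (L : List Int) (k : Nat) (acc : Int) (hk : k ≤ L.length) :
    (PySem.List.pyRange (k : Int) (PySem.List.len L) 1).foldl (fun ans i =>
      (PySem.List.pyRange i (PySem.List.len L) 1).foldl (fun ans j =>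
        if PySem.Int.mod num (PySem.List.pyGetD L i 0 + PySem.List.pyGetD L j 0) == 0
        then ans + 1 else ans) ans) acc
    = acc + pvTriCount (fun s => PySem.Int.mod num s == 0) (L.drop k) := by
  induction hn : L.length - k generalizing k acc with
  | zero =>
      have hk' : k = L.length := by omega
      subst hk'
      rw [PySem.List.pyRange_one_eq_nil (by simp [PySem.List.len_eq])]
      simp [pvTriCount]
  | succ m ih =>
      have hklt : k < L.length := by omega
      rw [PySem.List.pyRange_one_cons (by simp [PySem.List.len_eq]; omega)]
      rw [List.foldl_cons]
      have hdrop : L.drop k = L[k] :: L.drop (k + 1) := List.drop_eq_getElem_cons hklt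
      have hinner :
          (PySem.List.pyRange (k : Int) (PySem.List.len L) 1).foldl (fun ans j =>
            if PySem.Int.mod num (PySem.List.pyGetD L (k : Int) 0 + PySem.List.pyGetD L j 0) == 0
            then ans + 1 else ans) acc
          = (L.drop ((k : Int)).toNat).foldl (fun ans b =>
              if PySem.Int.mod num (PySem.List.pyGetD L (k : Int) 0 + b) == 0
              then ans + 1 else ans) acc :=
        PySem.List.foldl_pyRange_pyGetD L 0
          (fun ans b => if PySem.Int.mod num (PySem.List.pyGetD L (k : Int) 0 + b) == 0
            then ans + 1 else ans) acc (Int.natCast_nonneg k)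
      have hcount :
          (L.drop ((k : Int)).toNat).foldl (fun ans b =>
            if PySem.Int.mod num (PySem.List.pyGetD L (k : Int) 0 + b) == 0
            then ans + 1 else ans) acc
          = acc + ((L.drop ((k : Int)).toNat).countP
              (fun b => PySem.Int.mod num (PySem.List.pyGetD L (k : Int) 0 + b) == 0) : Int) :=
        PySem.List.foldl_if_add_one _ _ acc
      rw [hinner, hcount]
      have hget : PySem.List.pyGetD L (k : Int) 0 = L[k] := by
        rw [PySem.List.pyGetD_natCast, List.getD_eq_getElem L 0 hklt]
      have h1 : ((k : Int) + 1) = ((k + 1 : Nat) : Int) := by push_cast; ring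
      rw [h1, ih (k + 1) _ (by omega) (by omega)]
      have htoNat : ((k : Int)).toNat = k := Int.toNat_natCast k
      rw [htoNat, hget]
      conv_rhs => rw [hdrop]
      simp only [pvTriCount, ← hdrop]
      ring

theorem pvTwoTri (P : Int → Bool) (L : List Int) :
    pvTriCount P L * 2
      = (L.map (fun a => (L.countP (fun b => P (a + b)) : Int))).sum
        + (L.countP (fun a => P (a + a)) : Int) := by
  induction L with
  | nil => simp [pvTriCount]
  | cons x t ih =>
      have hsplit : (t.map (fun a => ((x :: t).countP (fun b => P (a + b)) : Int))).sum
          = (t.map (fun a => (t.countP (fun b => P (a + b)) : Int))).sum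
            + (t.countP (fun a => P (a + x)) : Int) := by
        have h1 : (t.map (fun a => ((x :: t).countP (fun b => P (a + b)) : Int))).sum
            = (t.map (fun a => (t.countP (fun b => P (a + b)) : Int)
                + (if P (a + x) then 1 else 0))).sum := by
          congr 1
          apply List.map_congr_left
          intro a _
          rw [List.countP_cons]
          push_cast
          ring
        rw [h1, PySem.List.sum_map_add_int, PySem.List.sum_map_ite_one_zero]
      have hcomm : (t.countP (fun a => P (a + x)) : Int)
          = (t.countP (fun b => P (x + b)) : Int) := by
        congr 1
        apply List.countP_congr
        intro a _
        simp [Int.add_comm]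
      simp only [pvTriCount, List.map_cons, List.sum_cons]
      rw [hsplit, hcomm]
      simp only [List.countP_cons]
      push_cast
      linarith [ih]

theorem pvB_total (num : Int) (L : List Int) (acc : Int) :
    L.foldl (fun acc a =>
      L.foldl (fun acc b =>
        if PySem.Int.mod num (a + b) == 0 then acc + 1 else acc) acc) acc
    = acc + (L.map (fun a => (L.countP (fun b => PySem.Int.mod num (a + b) == 0) : Int))).sum := by
  have h1 : L.foldl (fun acc a =>
      L.foldl (fun acc b =>
        if PySem.Int.mod num (a + b) == 0 then acc + 1 else acc) acc) acc
      = L.foldl (fun acc a =>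
          acc + (L.countP (fun b => PySem.Int.mod num (a + b) == 0) : Int)) acc :=
    PySem.List.foldl_congr_mem L _ _ acc
      (fun acc a _ => PySem.List.foldl_if_add_one _ L acc)
  rw [h1]
  exact PySem.List.foldl_add L _ acc

-- ===== VERDICT (by name: the statement is the Claim_ definition above) =====
theorem constraintB_spec : Claim_equal_constraintB := by
  intro num _ _
  unfold Spec_constraintB
  have hA : constraintB num
      = pvTriCount (fun s => PySem.Int.mod num s == 0) (pvDivisorsA num) := by
    have h := pvA_loop num (pvDivisorsA num) 0 0 (Nat.zero_le _)
    unfold constraintB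
    simpa using h
  have hB : constraintB_alt num
      = PySem.Int.floordiv
          (((pvDivisorsB num).foldl (fun acc a =>
              (pvDivisorsB num).foldl (fun acc b =>
                if PySem.Int.mod num (a + b) == 0 then acc + 1 else acc) acc) 0)
            + ((pvDivisorsB num).foldl (fun acc a =>
                if PySem.Int.mod num (a + a) == 0 then acc + 1 else acc) 0)) 2 := rfl
  rw [hA, hB, ← pvDivisors_eq]
  set L := pvDivisorsA num with hL
  rw [pvB_total num L 0, PySem.List.foldl_if_add_one _ L 0]
  simp only [zero_add]
  rw [← pvTwoTri (fun s => PySem.Int.mod num s == 0) L]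
  rw [Int.mul_comm, PySem.Int.floordiv_eq_ediv_of_pos (by norm_num)]
  simp
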